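-- pv_equiv track=rewrite | github.com/dsi-llc/scripts | runhandler.py | vCoreshexpinlist
-- ===== SOURCE A (Python) =====
-- def vCoreshexpinlist(domainCount, coresPerDomain, offset):
--     """
--     This function generates a list of hexidecimal numbers to pin
--     the exact cores to use on a computer for MPI runs.
--
--     inputs:
--         domainCount: int, domain number in the MPI run
--         coresPerDomain: int, cores to use in each domain
--         offset: int, cores to offset due to existing MPI runs
--
--     outputs:
--         pinlist: list, list of a string with hexidecimal numbers
--                  to pin each domain to a specific core
--     """
--     pinlist = []
--     # Assign cores usage for each domain
--     # fill cores from the front, towards the back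
--     for i in range(domainCount):
--         # cores used are represent by '1'
--         # cores offset are represent by '0'
--         cores_used = '10' * coresPerDomain
--         cores_used = cores_used[:-1]
--
--         empty_cores = '0' * 2 * (offset + i * coresPerDomain)
--
--         pin = cores_used + empty_cores
--         # convert binary to hexidecimal, drop the first 2 char '0x'
--         # then append to list
--         pinlist.append(hex(int(pin, 2))[2:])
--     # formatting, join all str to one
--     pinlist = ', '.join(pinlist)
--
--     return pinlist
-- ===== SOURCE B (Python) =====
-- def vCoreshexpinlist(domainCount, coresPerDomain, offset):
--     # no domains: nothing to pin
--     if domainCount <= 0: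
--         return ''
--     # no usable cores per domain: every mask is zero
--     if coresPerDomain <= 0:
--         return ', '.join(['0'] * domainCount)
--     # closed form: the binary pattern '1010...1' of coresPerDomain cores is (4**coresPerDomain - 1)//3
--     mask = (4 ** coresPerDomain - 1) // 3
--     parts = []
--     for i in range(domainCount):
--         start = offset + i * coresPerDomain
--         parts.append(format(mask * 4 ** max(start, 0), 'x'))
--     return ', '.join(parts)
-- ===== Notes on version B (the rewrite author's own statement) =====
-- stated objective: alternative
-- what changed: B replaces A's per-iteration building and base-2 re-parsing of a '10...10...0' string by integer arithmetic: early returns for empty/zero-core cases, then a closed-form mask (4**coresPerDomain - 1)//3 scaled by 4**max(offset + i*coresPerDomain, 0) and formatted as hex.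
import Mathlib
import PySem

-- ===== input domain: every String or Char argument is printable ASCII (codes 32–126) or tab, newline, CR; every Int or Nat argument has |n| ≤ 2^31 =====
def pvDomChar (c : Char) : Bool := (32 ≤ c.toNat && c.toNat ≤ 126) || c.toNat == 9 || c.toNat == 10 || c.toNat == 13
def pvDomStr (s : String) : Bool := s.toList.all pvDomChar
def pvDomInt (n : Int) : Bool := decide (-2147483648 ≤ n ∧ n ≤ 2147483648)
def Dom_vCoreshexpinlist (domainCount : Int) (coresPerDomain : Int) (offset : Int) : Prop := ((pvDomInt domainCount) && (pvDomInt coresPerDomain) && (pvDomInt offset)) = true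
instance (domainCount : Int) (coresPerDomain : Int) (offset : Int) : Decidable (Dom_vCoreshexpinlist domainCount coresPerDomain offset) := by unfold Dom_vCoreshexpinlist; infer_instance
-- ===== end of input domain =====

-- B replaces A's per-iteration binary-string building and re-parsing by closed-form integer
-- arithmetic (mask = (4^coresPerDomain - 1)//3 shifted); objective: alternative decomposition.

-- ===== PORT A =====
-- int(pin, 2) where pin consists only of '0'/'1' characters (no sign/space/underscore/prefix):
-- exact there; Python raises ValueError exactly when pin is empty — those inputs are excluded by Pre_.
def pvBinVal (cs : List Char) : Nat :=
  cs.foldl (fun a c => 2 * a + (if c = '1' then 1 else 0)) 0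

-- hex(n)[2:] for n ≥ 0 is the lowercase base-16 digits with no prefix: Nat.toDigits 16
def vCoreshexpinlist (domainCount : Int) (coresPerDomain : Int) (offset : Int) : String :=
  let pinlist := (PySem.List.pyRange 0 domainCount 1).foldl (fun pinlist i =>
    -- cores_used = '10' * coresPerDomain  (negative count → empty, exactly Python's str*int)
    let cores_used : List Char := (List.replicate coresPerDomain.toNat (['1', '0'] : List Char)).flatten
    -- cores_used = cores_used[:-1]  (dropLast is exact, incl. on the empty string)
    let cores_used := cores_used.dropLast
    -- empty_cores = '0' * 2 * (offset + i * coresPerDomain)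
    let empty_cores : List Char := List.replicate (2 * (offset + i * coresPerDomain)).toNat '0'
    let pin := cores_used ++ empty_cores
    pinlist ++ [String.ofList (Nat.toDigits 16 (pvBinVal pin))]) []
  PySem.Str.join ", " pinlist

-- ===== PORT B =====
def vCoreshexpinlist_alt (domainCount : Int) (coresPerDomain : Int) (offset : Int) : String :=
  -- no domains: nothing to pin
  if domainCount ≤ 0 then ""
  -- no usable cores per domain: every mask is zero
  else if coresPerDomain ≤ 0 then PySem.Str.join ", " (List.replicate domainCount.toNat "0")
  else
    -- 4 ** coresPerDomain with coresPerDomain > 0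
    let mask : Int := PySem.Int.floordiv ((4 : Int) ^ coresPerDomain.toNat - 1) 3
    let parts := (PySem.List.pyRange 0 domainCount 1).foldl (fun parts i =>
      let start := offset + i * coresPerDomain
      -- format(mask * 4 ** max(start, 0), 'x'): the value is always ≥ 0, lowercase hex digits
      parts ++ [String.ofList (Nat.toDigits 16 (mask * (4 : Int) ^ (max start 0).toNat).toNat)]) []
    PySem.Str.join ", " parts

-- ===== PRECONDITION & SPEC =====
-- Pre_ excludes exactly the inputs where A raises ValueError: coresPerDomain ≤ 0 with some
-- iteration's pin string empty, i.e. int('', 2).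
def Pre_vCoreshexpinlist (domainCount : Int) (coresPerDomain : Int) (offset : Int) : Prop :=
  domainCount ≤ 0 ∨ 1 ≤ coresPerDomain ∨ 1 ≤ offset + (domainCount - 1) * coresPerDomain
instance (domainCount : Int) (coresPerDomain : Int) (offset : Int) : Decidable (Pre_vCoreshexpinlist domainCount coresPerDomain offset) := by unfold Pre_vCoreshexpinlist; infer_instance

def pvWitness_vCoreshexpinlist : Int × Int × Int := (2, 1, 0)

def Spec_vCoreshexpinlist (domainCount : Int) (coresPerDomain : Int) (offset : Int) (out : String) : Prop := out = vCoreshexpinlist_alt domainCount coresPerDomain offset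
instance (domainCount : Int) (coresPerDomain : Int) (offset : Int) (out : String) : Decidable (Spec_vCoreshexpinlist domainCount coresPerDomain offset out) := by unfold Spec_vCoreshexpinlist; infer_instance

-- ===== CLAIM (what is proved, stated in full; the proofs are below) =====
def Claim_equal_vCoreshexpinlist : Prop := ∀ (domainCount : Int) (coresPerDomain : Int) (offset : Int), Dom_vCoreshexpinlist domainCount coresPerDomain offset → Pre_vCoreshexpinlist domainCount coresPerDomain offset → Spec_vCoreshexpinlist domainCount coresPerDomain offset (vCoreshexpinlist domainCount coresPerDomain offset)
-- ===== LEMMAS AND PROOFS =====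

-- folding the binary-digit accumulator over a run of '0's multiplies the accumulator by 2^n
lemma pvBinVal_aux_zeros (n : Nat) : ∀ acc : Nat,
    List.foldl (fun a c => 2 * a + (if c = '1' then 1 else 0)) acc (List.replicate n '0') = acc * 2 ^ n := by
  induction n with
  | zero => intro acc; simp
  | succ n ih =>
      intro acc
      simp only [List.replicate_succ, List.foldl_cons, if_neg (by decide : ¬('0' : Char) = '1'), ih]
      ring

lemma pvBinVal_append_zeros (s : List Char) (n : Nat) :
    pvBinVal (s ++ List.replicate n '0') = pvBinVal s * 2 ^ n := by
  unfold pvBinVal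
  rw [List.foldl_append, pvBinVal_aux_zeros]

-- the '1010…' pattern of k cores, as a list
def pvRep (k : Nat) : List Char := (List.replicate k (['1', '0'] : List Char)).flatten

lemma pvRep_succ (k : Nat) : pvRep (k + 1) = '1' :: '0' :: pvRep k := by
  simp [pvRep, List.replicate_succ]

lemma pvRep_length (k : Nat) : (pvRep k).length = 2 * k := by
  induction k with
  | zero => simp [pvRep]
  | succ k ih => rw [pvRep_succ]; simp [ih]; omega

lemma pvRep_ne_nil (k : Nat) (hk : 0 < k) : pvRep k ≠ [] := by
  intro h
  have := pvRep_length k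
  rw [h] at this
  simp at this
  omega

lemma pvBinVal_aux_shift (s : List Char) : ∀ acc : Nat,
    List.foldl (fun a c => 2 * a + (if c = '1' then 1 else 0)) acc s
      = acc * 2 ^ s.length + pvBinVal s := by
  unfold pvBinVal
  induction s with
  | nil => intro acc; simp
  | cons c t ih =>
      intro acc
      simp only [List.foldl_cons, List.length_cons]
      rw [ih, ih (2 * 0 + (if c = '1' then 1 else 0))]
      ring

-- value of the pattern with its last '0' dropped: 3 * it + 1 = 4^k
lemma pvMask_val (k : Nat) (hk : 0 < k) :
    3 * pvBinVal ((pvRep k).dropLast) + 1 = 4 ^ k := by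
  induction k with
  | zero => omega
  | succ k ih =>
      rcases Nat.eq_zero_or_pos k with h0 | hpos
      · subst h0
        decide
      · have hne := pvRep_ne_nil k hpos
        have hdrop : (pvRep (k + 1)).dropLast = '1' :: '0' :: (pvRep k).dropLast := by
          rw [pvRep_succ]
          cases h : pvRep k with
          | nil => exact absurd h hne
          | cons a t => simp
        rw [hdrop]
        unfold pvBinVal
        simp only [List.foldl_cons]
        rw [pvBinVal_aux_shift]
        have hlen : ((pvRep k).dropLast).length = 2 * k - 1 := by
          rw [List.length_dropLast, pvRep_length]
        rw [hlen]
        norm_num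
        have ihv := ih hpos
        have h2p : (2 : Nat) * 2 ^ (2 * k - 1) = 2 ^ (2 * k) := by
          rw [← pow_succ']
          congr 1
          omega
        have h4 : (4 : Nat) ^ k = 2 ^ (2 * k) := by
          rw [show (4 : Nat) = 2 ^ 2 by norm_num, ← pow_mul]
        calc 3 * (2 * 2 ^ (2 * k - 1) + pvBinVal (pvRep k).dropLast) + 1
            = 3 * (2 * 2 ^ (2 * k - 1)) + (3 * pvBinVal (pvRep k).dropLast + 1) := by ring
          _ = 3 * 2 ^ (2 * k) + 4 ^ k := by rw [h2p, ihv]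
          _ = 4 ^ (k + 1) := by rw [pow_succ, ← h4]; ring

-- B's mask equals the value A parses out of the pattern string
lemma pvMask_eq (cpd : Int) (hc : 0 < cpd) :
    PySem.Int.floordiv ((4 : Int) ^ cpd.toNat - 1) 3 = (pvBinVal ((pvRep cpd.toNat).dropLast) : Int) := by
  have hk : 0 < cpd.toNat := by omega
  have hm := pvMask_val cpd.toNat hk
  rw [show ((4 : Int) ^ cpd.toNat) = (((4 : Nat) ^ cpd.toNat : Nat) : Int) by push_cast; ring]
  rw [PySem.Int.floordiv_eq_ediv_of_pos (by norm_num)]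
  rw [← hm]
  push_cast
  rw [show (3 : Int) * (pvBinVal ((pvRep cpd.toNat).dropLast) : Int) + 1 - 1
        = 3 * (pvBinVal ((pvRep cpd.toNat).dropLast) : Int) by ring]
  exact Int.mul_ediv_cancel_left _ (by norm_num)

-- per-iteration items of the two ports agree when coresPerDomain > 0
lemma pv_item_eq (coresPerDomain offset i : Int) (hc : 0 < coresPerDomain) :
    pvBinVal
        (((List.replicate coresPerDomain.toNat (['1', '0'] : List Char)).flatten).dropLast
          ++ List.replicate (2 * (offset + i * coresPerDomain)).toNat '0')
      = (PySem.Int.floordiv ((4 : Int) ^ coresPerDomain.toNat - 1) 3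
          * (4 : Int) ^ (max (offset + i * coresPerDomain) 0).toNat).toNat := by
  have hexp : (2 * (offset + i * coresPerDomain)).toNat = 2 * (max (offset + i * coresPerDomain) 0).toNat := by
    omega
  rw [pvBinVal_append_zeros, pvMask_eq coresPerDomain hc, hexp]
  rw [show ((pvBinVal ((pvRep coresPerDomain.toNat).dropLast) : Int) * (4 : Int) ^ (max (offset + i * coresPerDomain) 0).toNat)
        = ((pvBinVal ((pvRep coresPerDomain.toNat).dropLast) * 4 ^ (max (offset + i * coresPerDomain) 0).toNat : Nat) : Int)
      by push_cast; ring]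
  rw [Int.toNat_natCast]
  rw [show (4 : Nat) = 2 ^ 2 by norm_num, ← pow_mul]
  simp only [pvRep]

-- with coresPerDomain ≤ 0, every item A appends is the hex digit "0"
lemma pv_item_zero (coresPerDomain offset i : Int) (hc : coresPerDomain ≤ 0) :
    String.ofList (Nat.toDigits 16 (pvBinVal
        (((List.replicate coresPerDomain.toNat (['1', '0'] : List Char)).flatten).dropLast
          ++ List.replicate (2 * (offset + i * coresPerDomain)).toNat '0'))) = "0" := by
  have h0 : coresPerDomain.toNat = 0 := by omega
  rw [h0]
  have : pvBinVal (((List.replicate 0 (['1', '0'] : List Char)).flatten).dropLast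
      ++ List.replicate (2 * (offset + i * coresPerDomain)).toNat '0') = 0 := by
    simp [pvBinVal, List.replicate, pvBinVal_aux_zeros]
  rw [this]
  decide

-- ===== VERDICT (by name: the statement is the Claim_ definition above) =====
theorem vCoreshexpinlist_spec : Claim_equal_vCoreshexpinlist := by
  intro domainCount coresPerDomain offset _ _
  show vCoreshexpinlist domainCount coresPerDomain offset = vCoreshexpinlist_alt domainCount coresPerDomain offset
  by_cases hd : domainCount ≤ 0
  · simp only [vCoreshexpinlist, vCoreshexpinlist_alt, if_pos hd]
    rw [PySem.List.pyRange_one, show (domainCount - 0).toNat = 0 by omega]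
    simp only [List.range_zero, List.map_nil, List.foldl_nil]
    rfl
  by_cases hc : coresPerDomain ≤ 0
  · simp only [vCoreshexpinlist, vCoreshexpinlist_alt, if_neg hd, if_pos hc]
    congr 1
    have hfun : (fun (pinlist : List String) (i : Int) => pinlist ++
        [String.ofList (Nat.toDigits 16 (pvBinVal
          (((List.replicate coresPerDomain.toNat (['1', '0'] : List Char)).flatten).dropLast
            ++ List.replicate (2 * (offset + i * coresPerDomain)).toNat '0')))])
        = (fun pinlist i => pinlist ++ [((fun _ : Int => "0") i)]) := by
      funext acc i
      rw [pv_item_zero coresPerDomain offset i hc]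
    rw [hfun, PySem.List.foldl_append_singleton_eq_map, List.nil_append, List.map_const',
        PySem.List.length_pyRange_one]
    congr 1
    omega
  · replace hc : 0 < coresPerDomain := by omega
    simp only [vCoreshexpinlist, vCoreshexpinlist_alt, if_neg hd,
      if_neg (by omega : ¬ coresPerDomain ≤ 0)]
    congr 1
    congr 1
    funext acc i
    exact congrArg (fun n => acc ++ [String.ofList (Nat.toDigits 16 n)]) (pv_item_eq coresPerDomain offset i hc)
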